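-- pv_equiv track=rewrite | github.com/RichardScottOZ/geoh5-bridge | src/geoh5_bridge/grid3d.py | _guess_xyz_dims
-- ===== SOURCE A (Python) =====
-- _X_NAMES = {"x", "easting", "lon", "longitude"}
--
-- _Y_NAMES = {"y", "northing", "lat", "latitude"}
--
-- _Z_NAMES = {"z", "depth", "elevation", "level", "height"}
--
-- def _guess_xyz_dims(
--     dims: list[str],
-- ) -> tuple[str, str, str]:
--     """Attempt to identify x, y, z dimension names from a list."""
--     x = y = z = None
--     for d in dims:
--         dl = d.lower()
--         if dl in _X_NAMES:
--             x = d
--         elif dl in _Y_NAMES: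
--             y = d
--         elif dl in _Z_NAMES:
--             z = d
--
--     if x is None or y is None or z is None:
--         # Fall back to positional order
--         x, y, z = dims[0], dims[1], dims[2]
--
--     return x, y, z
-- ===== SOURCE B (Python) =====
-- _X_NAMES = {"x", "easting", "lon", "longitude"}
--
-- _Y_NAMES = {"y", "northing", "lat", "latitude"}
--
-- _Z_NAMES = {"z", "depth", "elevation", "level", "height"}
--
--
-- def _last_match(dims, names):
--     """Last element of dims whose lowercase form is in names, else None."""
--     return next((d for d in reversed(dims) if d.lower() in names), None)
--
--
-- def _guess_xyz_dims(dims):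
--     x = _last_match(dims, _X_NAMES)
--     y = _last_match(dims, _Y_NAMES)
--     z = _last_match(dims, _Z_NAMES)
--     if x is None or y is None or z is None:
--         # Fall back to positional order
--         x, y, z = dims[0], dims[1], dims[2]
--     return x, y, z
-- ===== Notes on version B (the rewrite author's own statement) =====
-- stated objective: alternative
-- what changed: Replaces A's single combined loop carrying three mutable slots (with an if/elif chain) by a reusable helper that scans the reversed list once per category and returns the first (i.e. last-in-order) match, called three times; the positional fallback is unchanged.
import Mathlib
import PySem

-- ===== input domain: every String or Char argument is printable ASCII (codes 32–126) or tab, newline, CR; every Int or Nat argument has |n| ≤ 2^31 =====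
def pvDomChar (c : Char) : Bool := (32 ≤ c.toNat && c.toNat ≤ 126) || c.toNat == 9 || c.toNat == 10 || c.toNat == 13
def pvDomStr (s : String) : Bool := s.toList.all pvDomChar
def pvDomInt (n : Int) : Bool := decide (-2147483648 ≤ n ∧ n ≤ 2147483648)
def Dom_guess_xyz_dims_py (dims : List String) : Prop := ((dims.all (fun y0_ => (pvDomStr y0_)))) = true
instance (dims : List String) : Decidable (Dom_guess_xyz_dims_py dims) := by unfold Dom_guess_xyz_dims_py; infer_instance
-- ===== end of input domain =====

-- B replaces A's single combined if/elif loop by a per-category helper scanning the reversed list (alternative decomposition, same cost).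

-- ===== PORT A =====
-- the module-level name sets (Python sets of string literals), A's copies
def xNamesA : PySem.Set String := PySem.Set.ofList ["x", "easting", "lon", "longitude"]
def yNamesA : PySem.Set String := PySem.Set.ofList ["y", "northing", "lat", "latitude"]
def zNamesA : PySem.Set String := PySem.Set.ofList ["z", "depth", "elevation", "level", "height"]

-- the for-loop over dims updating the three slots x, y, z
def guess_xyz_dims_py (dims : List String) : String × String × String :=
  let st := dims.foldl
    (fun (acc : Option String × Option String × Option String) d =>
      let dl := PySem.Str.lower d
      if PySem.Set.contains xNamesA dl then (some d, acc.2.1, acc.2.2)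
      else if PySem.Set.contains yNamesA dl then (acc.1, some d, acc.2.2)
      else if PySem.Set.contains zNamesA dl then (acc.1, acc.2.1, some d)
      else acc)
    (none, none, none)
  match st with
  | (some x, some y, some z) => (x, y, z)
  | _ =>
    -- positional fallback dims[0], dims[1], dims[2]; pyGet? = none is IndexError, excluded by Pre_
    ((PySem.List.pyGet? dims 0).getD "", (PySem.List.pyGet? dims 1).getD "", (PySem.List.pyGet? dims 2).getD "")

-- ===== PORT B =====
-- the module-level name sets, B's copies
def xNamesB : PySem.Set String := PySem.Set.ofList ["x", "easting", "lon", "longitude"]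
def yNamesB : PySem.Set String := PySem.Set.ofList ["y", "northing", "lat", "latitude"]
def zNamesB : PySem.Set String := PySem.Set.ofList ["z", "depth", "elevation", "level", "height"]

-- helper: first element of reversed(dims) whose lowercase form is in names
def lastMatch (dims : List String) (names : PySem.Set String) : Option String :=
  dims.reverse.find? (fun d => PySem.Set.contains names (PySem.Str.lower d))

def guess_xyz_dims_py_alt (dims : List String) : String × String × String :=
  let x := lastMatch dims xNamesB
  let y := lastMatch dims yNamesB
  let z := lastMatch dims zNamesB
  -- if x is None or y is None or z is None: positional fallback, else the three matches
  let fb := ((PySem.List.pyGet? dims 0).getD "", (PySem.List.pyGet? dims 1).getD "", (PySem.List.pyGet? dims 2).getD "")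
  match x with
  | none => fb
  | some xv =>
    match y with
    | none => fb
    | some yv =>
      match z with
      | none => fb
      | some zv => (xv, yv, zv)

-- ===== PRECONDITION & SPEC =====
-- Pre_ excludes exactly the inputs where A raises IndexError: fewer than 3 dims while some category has no match
-- (there the positional fallback dims[0], dims[1], dims[2] fails in both A and B).
def Pre_guess_xyz_dims_py (dims : List String) : Prop :=
  3 ≤ dims.length ∨
    ((dims.any fun d => PySem.Set.contains (PySem.Set.ofList ["x", "easting", "lon", "longitude"]) (PySem.Str.lower d)) = true ∧
     (dims.any fun d => PySem.Set.contains (PySem.Set.ofList ["y", "northing", "lat", "latitude"]) (PySem.Str.lower d)) = true ∧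
     (dims.any fun d => PySem.Set.contains (PySem.Set.ofList ["z", "depth", "elevation", "level", "height"]) (PySem.Str.lower d)) = true)
instance (dims : List String) : Decidable (Pre_guess_xyz_dims_py dims) := by
  unfold Pre_guess_xyz_dims_py; infer_instance

def pvWitness_guess_xyz_dims_py : List String := ["lon", "lat", "depth"]

def Spec_guess_xyz_dims_py (dims : List String) (out : String × String × String) : Prop := out = guess_xyz_dims_py_alt dims
instance (dims : List String) (out : String × String × String) : Decidable (Spec_guess_xyz_dims_py dims out) := by unfold Spec_guess_xyz_dims_py; infer_instance

-- ===== CLAIM (what is proved, stated in full; the proofs are below) =====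
def Claim_equal_guess_xyz_dims_py : Prop := ∀ (dims : List String), Dom_guess_xyz_dims_py dims → Pre_guess_xyz_dims_py dims → Spec_guess_xyz_dims_py dims (guess_xyz_dims_py dims)

-- ===== LEMMAS AND PROOFS =====

-- predicates abbreviating the membership tests
def pX (d : String) : Bool := PySem.Set.contains xNamesA (PySem.Str.lower d)
def pY (d : String) : Bool := PySem.Set.contains yNamesA (PySem.Str.lower d)
def pZ (d : String) : Bool := PySem.Set.contains zNamesA (PySem.Str.lower d)

-- the name sets are pairwise disjoint, so the elif chain never hides a match
theorem notY_of_X (s : String) (h : s ∈ xNamesA) : s ∉ yNamesA := by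
  have ex : xNamesA = ["x", "easting", "lon", "longitude"] := by decide
  have ey : yNamesA = ["y", "northing", "lat", "latitude"] := by decide
  rw [ex] at h; rw [ey]
  simp at h ⊢
  rcases h with h | h | h | h <;> simp [h]

theorem notZ_of_X (s : String) (h : s ∈ xNamesA) : s ∉ zNamesA := by
  have ex : xNamesA = ["x", "easting", "lon", "longitude"] := by decide
  have ez : zNamesA = ["z", "depth", "elevation", "level", "height"] := by decide
  rw [ex] at h; rw [ez]
  simp at h ⊢
  rcases h with h | h | h | h <;> simp [h]

theorem notZ_of_Y (s : String) (h : s ∈ yNamesA) : s ∉ zNamesA := by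
  have ey : yNamesA = ["y", "northing", "lat", "latitude"] := by decide
  have ez : zNamesA = ["z", "depth", "elevation", "level", "height"] := by decide
  rw [ey] at h; rw [ez]
  simp at h ⊢
  rcases h with h | h | h | h <;> simp [h]

-- characterisation of A's loop state: each slot holds the last match so far, over any initial state
theorem foldl_char (dims : List String) (acc : Option String × Option String × Option String) :
    dims.foldl
      (fun (acc : Option String × Option String × Option String) d =>
        let dl := PySem.Str.lower d
        if PySem.Set.contains xNamesA dl then (some d, acc.2.1, acc.2.2)
        else if PySem.Set.contains yNamesA dl then (acc.1, some d, acc.2.2)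
        else if PySem.Set.contains zNamesA dl then (acc.1, acc.2.1, some d)
        else acc)
      acc
    = ((dims.reverse.find? pX).or acc.1,
       (dims.reverse.find? pY).or acc.2.1,
       (dims.reverse.find? pZ).or acc.2.2) := by
  induction dims generalizing acc with
  | nil => simp
  | cons d rest ih =>
    simp only [List.foldl_cons, List.reverse_cons, List.find?_append]
    rw [ih]
    by_cases hx : PySem.Str.lower d ∈ xNamesA
    · have hy := notY_of_X _ hx
      have hz := notZ_of_X _ hx
      simp [hx, hy, hz, List.find?, pX, pY, pZ]
    · by_cases hy : PySem.Str.lower d ∈ yNamesA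
      · have hz := notZ_of_Y _ hy
        simp [hx, hy, hz, List.find?, pX, pY, pZ]
      · by_cases hz : PySem.Str.lower d ∈ zNamesA
        · simp [hx, hy, hz, List.find?, pX, pY, pZ]
        · simp [hx, hy, hz, List.find?, pX, pY, pZ]

-- B's per-category scan equals the corresponding slot of A's loop
theorem lastMatch_eq_x (dims : List String) : lastMatch dims xNamesB = dims.reverse.find? pX := by
  have h : xNamesB = xNamesA := by decide
  unfold lastMatch pX
  rw [h]
theorem lastMatch_eq_y (dims : List String) : lastMatch dims yNamesB = dims.reverse.find? pY := by
  have h : yNamesB = yNamesA := by decide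
  unfold lastMatch pY
  rw [h]
theorem lastMatch_eq_z (dims : List String) : lastMatch dims zNamesB = dims.reverse.find? pZ := by
  have h : zNamesB = zNamesA := by decide
  unfold lastMatch pZ
  rw [h]

-- ===== VERDICT (by name: the statement is the Claim_ definition above) =====
theorem guess_xyz_dims_py_spec : Claim_equal_guess_xyz_dims_py := by
  intro dims _ _
  unfold Spec_guess_xyz_dims_py guess_xyz_dims_py guess_xyz_dims_py_alt
  rw [foldl_char, lastMatch_eq_x, lastMatch_eq_y, lastMatch_eq_z]
  simp only [Option.or_none]
  rcases hx : dims.reverse.find? pX with _ | x <;>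
    rcases hy : dims.reverse.find? pY with _ | y <;>
    rcases hz : dims.reverse.find? pZ with _ | z <;> rfl
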